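-- pv_equiv track=rewrite | github.com/MasArMuttaqi/almanak | kalender_jawa_sultan_agungan.py | cari_parerasan
-- ===== SOURCE A (Python) =====
-- data_parerasan = {
--         "PasaranPancasuda": ["Ahad Pon", "Senen Kliwon", "Selasa Pahing", "Rebo Legi", "Kemis Wage"],
--         "Aras Kembang": ["Senen Pon", "Selasa Kliwon", "Rebo Wage", "Jumuwah Legi"],
--         "Aras Tuding": ["Ahad Pon", "Senen Pahing", "Rebo Pon", "Kemis Kliwon", "Setu Legi"],
--         "Bumi Kapetak": ["Setu Pon", "Rebo Pahing", "Kemis Kliwon"],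
--         "Laku Yeh": ["Senen Wage", "Selasa Legi", "Setu Pahing"],
--         "Laku Api": ["Ahad Wage", "Senen Legi"],
--         "Laku Angin": ["Ahad Kliwon", "Senen Pahing", "Kemis Legi", "Jemuwah Pon"],
--         "Laku Bintang": ["Ahad Pahing", "Rebo Pon", "Jemuwah Kliwon", "Setu Legi"],
--         "Laku Bulan": ["Selasa Wage", "Setu Kliwon", "Kemis Pahing"],
--         "Laku Bumi": ["Rebo Kliwon", "Kemis Pon", "Setu Pahing"],
--         "Laku Surya": ["Ahad Legi", "Selasa Pon", "Setu Wage"],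
--         "Laku Pandita Sakti": ["Ahad Kliwon", "Selasa Wage", "Kemis Pahing", "Setu Pon"],
--         "Lebu Katiup Angin": ["Senen Wage", "Selasa Pon", "Rebo Wage", "Kemis Legi", "Setu Pahing"],
--         "Satria Wibawa": ["Senen Kliwon", "Selasa Pahing", "Kemis Pon", "Jemuwah Legi", "Setu Wage"],
--         "Satria Wirang": ["Ahad Legi", "Senen Pon", "Selasa Kliwon", "Rebo Legi", "Jemuwah Wage"],
--         "Sumur Sinaba": ["Senen Legi", "Jemuwah Pahing", "Kemis Wage", "Setu Kliwon"],
--         "Tunggak Semi": ["Ahad Pahing", "Senen Wage", "Selasa Legi", "Jemuwah Kliwon", "Setu Pon"]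
--     }
--
-- def cari_parerasan(dina_nama, pasaran_nama):
--     # 1. Concat menjadi satu variabel
--     hari_input = f"{dina_nama} {pasaran_nama}"
--
--     hasil = []
--     # 2. Mencari hari di dalam setiap kategori
--     for kategori, daftar_hari in data_parerasan.items():
--         if hari_input in daftar_hari:
--             hasil.append(kategori)
--
--     # 3. Kembalikan seluruh array hasil
--     if hasil:
--         return hasil  # Mengembalikan array berisi semua kategori yang ditemukan
--     else:
--         return ["Data tidak ditemukan"]
-- ===== SOURCE B (Python) =====
-- # Same data, restructured: one literal table keyed by the day-pasaran string,
-- # giving the categories that contain it (in the original category order).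
-- parerasan_per_hari = {
--     "Ahad Pon": ["PasaranPancasuda", "Aras Tuding"],
--     "Senen Kliwon": ["PasaranPancasuda", "Satria Wibawa"],
--     "Selasa Pahing": ["PasaranPancasuda", "Satria Wibawa"],
--     "Rebo Legi": ["PasaranPancasuda", "Satria Wirang"],
--     "Kemis Wage": ["PasaranPancasuda", "Sumur Sinaba"],
--     "Senen Pon": ["Aras Kembang", "Satria Wirang"],
--     "Selasa Kliwon": ["Aras Kembang", "Satria Wirang"],
--     "Rebo Wage": ["Aras Kembang", "Lebu Katiup Angin"],
--     "Jumuwah Legi": ["Aras Kembang"],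
--     "Senen Pahing": ["Aras Tuding", "Laku Angin"],
--     "Rebo Pon": ["Aras Tuding", "Laku Bintang"],
--     "Kemis Kliwon": ["Aras Tuding", "Bumi Kapetak"],
--     "Setu Legi": ["Aras Tuding", "Laku Bintang"],
--     "Setu Pon": ["Bumi Kapetak", "Laku Pandita Sakti", "Tunggak Semi"],
--     "Rebo Pahing": ["Bumi Kapetak"],
--     "Senen Wage": ["Laku Yeh", "Lebu Katiup Angin", "Tunggak Semi"],
--     "Selasa Legi": ["Laku Yeh", "Tunggak Semi"],
--     "Setu Pahing": ["Laku Yeh", "Laku Bumi", "Lebu Katiup Angin"],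
--     "Ahad Wage": ["Laku Api"],
--     "Senen Legi": ["Laku Api", "Sumur Sinaba"],
--     "Ahad Kliwon": ["Laku Angin", "Laku Pandita Sakti"],
--     "Kemis Legi": ["Laku Angin", "Lebu Katiup Angin"],
--     "Jemuwah Pon": ["Laku Angin"],
--     "Ahad Pahing": ["Laku Bintang", "Tunggak Semi"],
--     "Jemuwah Kliwon": ["Laku Bintang", "Tunggak Semi"],
--     "Selasa Wage": ["Laku Bulan", "Laku Pandita Sakti"],
--     "Setu Kliwon": ["Laku Bulan", "Sumur Sinaba"],
--     "Kemis Pahing": ["Laku Bulan", "Laku Pandita Sakti"],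
--     "Rebo Kliwon": ["Laku Bumi"],
--     "Kemis Pon": ["Laku Bumi", "Satria Wibawa"],
--     "Ahad Legi": ["Laku Surya", "Satria Wirang"],
--     "Selasa Pon": ["Laku Surya", "Lebu Katiup Angin"],
--     "Setu Wage": ["Laku Surya", "Satria Wibawa"],
--     "Jemuwah Legi": ["Satria Wibawa"],
--     "Jemuwah Wage": ["Satria Wirang"],
--     "Jemuwah Pahing": ["Sumur Sinaba"],
-- }
--
-- def cari_parerasan(dina_nama, pasaran_nama):
--     # fresh list so callers cannot mutate the shared table
--     return list(parerasan_per_hari.get(f"{dina_nama} {pasaran_nama}",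
--                                        ["Data tidak ditemukan"]))
-- ===== Notes on version B (the rewrite author's own statement) =====
-- stated objective: idiomatic
-- what changed: Replaces the per-call scan over all 17 categories (with an inner membership test in each category's day list) by a literal inverted table keyed by the day-pasaran string, so each call is a single dict lookup with a default.
import Mathlib
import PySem

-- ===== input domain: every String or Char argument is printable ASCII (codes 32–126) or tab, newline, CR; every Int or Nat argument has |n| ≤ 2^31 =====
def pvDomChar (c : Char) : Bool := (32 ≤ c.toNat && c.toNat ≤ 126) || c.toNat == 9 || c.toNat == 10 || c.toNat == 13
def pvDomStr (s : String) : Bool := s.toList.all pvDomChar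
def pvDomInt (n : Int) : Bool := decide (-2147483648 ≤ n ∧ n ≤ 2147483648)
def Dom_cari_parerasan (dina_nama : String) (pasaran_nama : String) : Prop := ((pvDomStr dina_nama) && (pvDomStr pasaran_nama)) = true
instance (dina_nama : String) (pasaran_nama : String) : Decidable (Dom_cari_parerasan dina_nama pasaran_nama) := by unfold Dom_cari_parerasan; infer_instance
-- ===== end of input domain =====

-- B replaces A's per-call scan over all categories by a literal inverted table
-- (day-pasaran string -> categories) and a single dict lookup (objective: idiomatic).

-- ===== PORT A =====
def data_parerasan : List (String × List String) := [
  ("PasaranPancasuda", ["Ahad Pon", "Senen Kliwon", "Selasa Pahing", "Rebo Legi", "Kemis Wage"]),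
  ("Aras Kembang", ["Senen Pon", "Selasa Kliwon", "Rebo Wage", "Jumuwah Legi"]),
  ("Aras Tuding", ["Ahad Pon", "Senen Pahing", "Rebo Pon", "Kemis Kliwon", "Setu Legi"]),
  ("Bumi Kapetak", ["Setu Pon", "Rebo Pahing", "Kemis Kliwon"]),
  ("Laku Yeh", ["Senen Wage", "Selasa Legi", "Setu Pahing"]),
  ("Laku Api", ["Ahad Wage", "Senen Legi"]),
  ("Laku Angin", ["Ahad Kliwon", "Senen Pahing", "Kemis Legi", "Jemuwah Pon"]),
  ("Laku Bintang", ["Ahad Pahing", "Rebo Pon", "Jemuwah Kliwon", "Setu Legi"]),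
  ("Laku Bulan", ["Selasa Wage", "Setu Kliwon", "Kemis Pahing"]),
  ("Laku Bumi", ["Rebo Kliwon", "Kemis Pon", "Setu Pahing"]),
  ("Laku Surya", ["Ahad Legi", "Selasa Pon", "Setu Wage"]),
  ("Laku Pandita Sakti", ["Ahad Kliwon", "Selasa Wage", "Kemis Pahing", "Setu Pon"]),
  ("Lebu Katiup Angin", ["Senen Wage", "Selasa Pon", "Rebo Wage", "Kemis Legi", "Setu Pahing"]),
  ("Satria Wibawa", ["Senen Kliwon", "Selasa Pahing", "Kemis Pon", "Jemuwah Legi", "Setu Wage"]),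
  ("Satria Wirang", ["Ahad Legi", "Senen Pon", "Selasa Kliwon", "Rebo Legi", "Jemuwah Wage"]),
  ("Sumur Sinaba", ["Senen Legi", "Jemuwah Pahing", "Kemis Wage", "Setu Kliwon"]),
  ("Tunggak Semi", ["Ahad Pahing", "Senen Wage", "Selasa Legi", "Jemuwah Kliwon", "Setu Pon"])]

def cari_parerasan (dina_nama : String) (pasaran_nama : String) : List String :=
  let hari_input := dina_nama ++ " " ++ pasaran_nama
  let hasil := data_parerasan.foldl
    (fun hasil kv => if kv.2.contains hari_input then hasil ++ [kv.1] else hasil) []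
  if hasil ≠ [] then hasil else ["Data tidak ditemukan"]

-- ===== PORT B =====
-- literal inverted table: day-pasaran string -> categories containing it
def parerasan_per_hari : PySem.Dict String (List String) := PySem.Dict.ofList [
  ("Ahad Pon", ["PasaranPancasuda", "Aras Tuding"]),
  ("Senen Kliwon", ["PasaranPancasuda", "Satria Wibawa"]),
  ("Selasa Pahing", ["PasaranPancasuda", "Satria Wibawa"]),
  ("Rebo Legi", ["PasaranPancasuda", "Satria Wirang"]),
  ("Kemis Wage", ["PasaranPancasuda", "Sumur Sinaba"]),
  ("Senen Pon", ["Aras Kembang", "Satria Wirang"]),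
  ("Selasa Kliwon", ["Aras Kembang", "Satria Wirang"]),
  ("Rebo Wage", ["Aras Kembang", "Lebu Katiup Angin"]),
  ("Jumuwah Legi", ["Aras Kembang"]),
  ("Senen Pahing", ["Aras Tuding", "Laku Angin"]),
  ("Rebo Pon", ["Aras Tuding", "Laku Bintang"]),
  ("Kemis Kliwon", ["Aras Tuding", "Bumi Kapetak"]),
  ("Setu Legi", ["Aras Tuding", "Laku Bintang"]),
  ("Setu Pon", ["Bumi Kapetak", "Laku Pandita Sakti", "Tunggak Semi"]),
  ("Rebo Pahing", ["Bumi Kapetak"]),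
  ("Senen Wage", ["Laku Yeh", "Lebu Katiup Angin", "Tunggak Semi"]),
  ("Selasa Legi", ["Laku Yeh", "Tunggak Semi"]),
  ("Setu Pahing", ["Laku Yeh", "Laku Bumi", "Lebu Katiup Angin"]),
  ("Ahad Wage", ["Laku Api"]),
  ("Senen Legi", ["Laku Api", "Sumur Sinaba"]),
  ("Ahad Kliwon", ["Laku Angin", "Laku Pandita Sakti"]),
  ("Kemis Legi", ["Laku Angin", "Lebu Katiup Angin"]),
  ("Jemuwah Pon", ["Laku Angin"]),
  ("Ahad Pahing", ["Laku Bintang", "Tunggak Semi"]),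
  ("Jemuwah Kliwon", ["Laku Bintang", "Tunggak Semi"]),
  ("Selasa Wage", ["Laku Bulan", "Laku Pandita Sakti"]),
  ("Setu Kliwon", ["Laku Bulan", "Sumur Sinaba"]),
  ("Kemis Pahing", ["Laku Bulan", "Laku Pandita Sakti"]),
  ("Rebo Kliwon", ["Laku Bumi"]),
  ("Kemis Pon", ["Laku Bumi", "Satria Wibawa"]),
  ("Ahad Legi", ["Laku Surya", "Satria Wirang"]),
  ("Selasa Pon", ["Laku Surya", "Lebu Katiup Angin"]),
  ("Setu Wage", ["Laku Surya", "Satria Wibawa"]),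
  ("Jemuwah Legi", ["Satria Wibawa"]),
  ("Jemuwah Wage", ["Satria Wirang"]),
  ("Jemuwah Pahing", ["Sumur Sinaba"])]

def cari_parerasan_alt (dina_nama : String) (pasaran_nama : String) : List String :=
  parerasan_per_hari.getD (dina_nama ++ " " ++ pasaran_nama) ["Data tidak ditemukan"]

-- ===== PRECONDITION & SPEC =====
def Spec_cari_parerasan (dina_nama : String) (pasaran_nama : String) (out : List String) : Prop := out = cari_parerasan_alt dina_nama pasaran_nama
instance (dina_nama : String) (pasaran_nama : String) (out : List String) : Decidable (Spec_cari_parerasan dina_nama pasaran_nama out) := by unfold Spec_cari_parerasan; infer_instance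

-- ===== CLAIM (what is proved, stated in full; the proofs are below) =====
def Claim_equal_cari_parerasan : Prop := ∀ (dina_nama : String) (pasaran_nama : String), Dom_cari_parerasan dina_nama pasaran_nama → Spec_cari_parerasan dina_nama pasaran_nama (cari_parerasan dina_nama pasaran_nama)

-- ===== LEMMAS AND PROOFS =====

-- proof-side helpers: A's table flattened to (day, category) pairs, and the
-- dict built from them by sequential appends — shown equal to B's literal table
def pv_pairs : List (String × String) :=
  data_parerasan.flatMap (fun kv => kv.2.map (fun hari => (hari, kv.1)))

def pv_index : PySem.Dict String (List String) :=
  pv_pairs.foldl (fun d p => d.modify p.1 [] (· ++ [p.2])) PySem.Dict.empty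

set_option maxRecDepth 4000 in
lemma index_eq_literal : pv_index = parerasan_per_hari := by decide

-- one category's contribution to the pairs-filter equals its membership test
lemma cat_filter (k s : String) (hs : List String) (hnd : hs.Nodup) :
    ((hs.map (fun h => (h, k))).filter (fun p => p.1 == s)).map (·.2)
      = if hs.contains s then [k] else [] := by
  induction hs with
  | nil => simp
  | cons h t ih =>
    rcases List.nodup_cons.mp hnd with ⟨hniht, hndt⟩
    by_cases hhs : h = s
    · subst hhs
      simp [ih hndt, List.contains_eq_mem, hniht]
    · have hb : (h == s) = false := beq_eq_false_iff_ne.mpr hhs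
      have hsh : ¬s = h := fun e => hhs e.symm
      simp [hb, hsh, ih hndt]

-- A's filtered category names equal the pairs-filter (per-category lists are Nodup)
lemma scan_eq_filter (s : String) (data : List (String × List String))
    (hnd : ∀ kv ∈ data, kv.2.Nodup) :
    (data.filter (fun kv => kv.2.contains s)).map (·.1)
      = ((data.flatMap (fun kv => kv.2.map (fun hari => (hari, kv.1)))).filter
          (fun p => p.1 == s)).map (·.2) := by
  induction data with
  | nil => simp
  | cons kv rest ih =>
    have h1 := cat_filter kv.1 s kv.2 (hnd kv (by simp))
    have h2 := ih (fun x hx => hnd x (List.mem_cons_of_mem _ hx))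
    simp only [List.flatMap_cons, List.filter_append, List.map_append, h1]
    by_cases hc : kv.2.contains s = true
    · rw [List.filter_cons_of_pos (p := fun kv => kv.2.contains s) (l := rest)
          (by exact hc), if_pos hc, List.map_cons, h2]
      rfl
    · rw [List.filter_cons_of_neg (p := fun kv => kv.2.contains s) (l := rest)
          (by exact hc), if_neg hc, h2, List.nil_append]

-- what the index lookup returns, in terms of the pairs-filter
lemma getD_index (s : String) (d0 : List String) :
    pv_index.getD s d0 =
      (fun c => if c = [] then d0 else c)
        ((pv_pairs.filter (fun p => p.1 == s)).map (·.2)) := by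
  set c := (pv_pairs.filter (fun p => p.1 == s)).map (·.2) with hc
  have hbase : pv_index.getD s [] = c := by
    have h := PySem.Dict.getD_foldl_modify_append pv_pairs
      (PySem.Dict.empty : PySem.Dict String (List String)) s
    rw [PySem.Dict.getD_empty, List.nil_append] at h
    exact h
  by_cases hnil : c = []
  · have hkeys : pv_index.keys =
        PySem.Set.update (PySem.Dict.empty : PySem.Dict String (List String)).keys
          (pv_pairs.map (·.1)) :=
      PySem.Dict.keys_foldl_modify_key pv_pairs (·.1) []
        (fun _ p x => x ++ [p.2]) PySem.Dict.empty
    have hmem : s ∉ pv_pairs.map (·.1) := by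
      intro hs
      rcases List.mem_map.mp hs with ⟨p, hp, hps⟩
      have hpf : p ∈ pv_pairs.filter (fun p => p.1 == s) :=
        List.mem_filter.mpr ⟨hp, by simp [hps]⟩
      have : p.2 ∈ c := by rw [hc]; exact List.mem_map_of_mem hpf
      simp [hnil] at this
    have hnone : pv_index.get? s = none := by
      rw [PySem.Dict.get?_eq_none_iff_not_mem_keys, hkeys]
      rw [show (PySem.Dict.empty : PySem.Dict String (List String)).keys
            = ([] : List String) from rfl]
      rw [show PySem.Set.update ([] : List String) (pv_pairs.map (·.1))
            = PySem.Set.ofList (pv_pairs.map (·.1)) from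
          (PySem.Set.ofList_eq_foldl _).symm]
      intro h
      exact hmem ((PySem.Set.mem_ofList _ _).mp h)
    simp [hnil, PySem.Dict.getD_of_get?_eq_none _ _ hnone]
  · have hsome : pv_index.get? s = some c := by
      rcases h : pv_index.get? s with _ | v
      · exact absurd (by rw [← hbase]; exact PySem.Dict.getD_of_get?_eq_none _ _ h) hnil
      · rw [PySem.Dict.getD_of_get?_eq_some _ _ h] at hbase; rw [hbase]
    simp [hnil, PySem.Dict.getD_of_get?_eq_some _ _ hsome]

-- the two programs agree for every joined day-pasaran string
lemma core_eq (s : String) :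
    (if (data_parerasan.foldl
          (fun hasil kv => if kv.2.contains s then hasil ++ [kv.1] else hasil) []) ≠ []
      then (data_parerasan.foldl
          (fun hasil kv => if kv.2.contains s then hasil ++ [kv.1] else hasil) [])
      else ["Data tidak ditemukan"])
      = parerasan_per_hari.getD s ["Data tidak ditemukan"] := by
  have hnd : ∀ kv ∈ data_parerasan, kv.2.Nodup := by decide
  rw [← index_eq_literal,
    PySem.List.foldl_append_if (fun kv => kv.2.contains s) (·.1) data_parerasan [],
    List.nil_append, scan_eq_filter s data_parerasan hnd,
    show (data_parerasan.flatMap (fun kv => kv.2.map (fun hari => (hari, kv.1))))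
        = pv_pairs from rfl, getD_index]
  by_cases hnil :
      ((pv_pairs.filter (fun p => p.1 == s)).map (·.2)) = ([] : List String)
  · simp [hnil]
  · simp [hnil]

-- ===== VERDICT (by name: the statement is the Claim_ definition above) =====
theorem cari_parerasan_spec : Claim_equal_cari_parerasan := by
  intro dina pasaran _
  exact core_eq (dina ++ " " ++ pasaran)
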